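-- pv_equiv track=rewrite | github.com/ProblmZro/Algorithm-study | baekjoon/17829.py | Pulling
-- ===== SOURCE A (Python) =====
-- def Pulling(n, arr) :
--   if n == 1:
--     return arr[0][0]
--   new_mat = [[] for _ in range(n//2)]
--   for i in range(0, n, 2):
--     for j in range(0, n, 2):
--       new_mat[i//2].append(sorted([arr[i][j], arr[i][j+1], arr[i+1][j], arr[i+1][j+1]])[2])
--   return Pulling(n//2, new_mat)
-- ===== SOURCE B (Python) =====
-- def Pulling(n, arr):
--     def solve(r, c, size):
--         if size == 1:
--             return arr[r][c]
--         half = size // 2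
--         return sorted([solve(r, c, half), solve(r, c + half, half),
--                        solve(r + half, c, half), solve(r + half, c + half, half)])[2]
--     return solve(0, 0, n)
-- ===== Notes on version B (the rewrite author's own statement) =====
-- stated objective: alternative
-- what changed: Replaces A's bottom-up construction of successively halved matrices by a top-down quadrant recursion over (row, col, size) index triples that reads the original grid directly and builds no intermediate matrices.
import Mathlib
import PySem

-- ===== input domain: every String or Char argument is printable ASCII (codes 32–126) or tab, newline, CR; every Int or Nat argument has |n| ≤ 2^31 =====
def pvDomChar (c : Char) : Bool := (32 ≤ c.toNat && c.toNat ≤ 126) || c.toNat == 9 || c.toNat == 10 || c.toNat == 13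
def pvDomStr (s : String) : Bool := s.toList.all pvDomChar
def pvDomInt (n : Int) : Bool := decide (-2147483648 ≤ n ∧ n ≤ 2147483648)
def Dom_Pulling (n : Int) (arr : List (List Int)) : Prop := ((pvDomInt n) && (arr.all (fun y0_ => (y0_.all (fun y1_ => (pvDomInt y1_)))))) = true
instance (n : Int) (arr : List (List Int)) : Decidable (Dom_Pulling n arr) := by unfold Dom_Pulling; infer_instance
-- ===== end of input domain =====

-- B replaces A's bottom-up construction of successively halved matrices by a top-down
-- quadrant recursion over (row, col, size) that reads the original grid directly and
-- builds no intermediate matrices; same values on the stated domain.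

-- ===== PORT A =====
-- arr[i][j] (indices valid on every admitted input; .getD 0 only makes the port total)
def pvAt (arr : List (List Int)) (i j : Int) : Int :=
  (PySem.List.pyGet? ((PySem.List.pyGet? arr i).getD []) j).getD 0

-- sorted([arr[i][j], arr[i][j+1], arr[i+1][j], arr[i+1][j+1]])[2]
def pvThird (arr : List (List Int)) (i j : Int) : Int :=
  (PySem.List.pyGet?
    (PySem.List.sorted [pvAt arr i j, pvAt arr i (j+1), pvAt arr (i+1) j, pvAt arr (i+1) (j+1)]
      (fun x => x) false) 2).getD 0

def Pulling (n : Int) (arr : List (List Int)) : Int :=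
  if n = 1 then pvAt arr 0 0
  else if n < 1 then 0  -- totality guard: for n < 1 the Python recurses forever (outside Pre_)
  else
    let init : List (List Int) := List.replicate (PySem.Int.floordiv n 2).toNat []
    let new_mat := (PySem.List.pyRange 0 n 2).foldl
      (fun mat i => (PySem.List.pyRange 0 n 2).foldl
        (fun mat j =>
          mat.modify (PySem.Int.floordiv i 2).toNat (fun row => row ++ [pvThird arr i j])) mat)
      init
    Pulling (PySem.Int.floordiv n 2) new_mat
termination_by n.toNat
decreasing_by
  rw [PySem.Int.floordiv_eq_ediv_of_pos (by omega)]
  omega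

-- ===== PORT B =====
-- Source B's inner 'solve(r, c, size)' (closure over arr becomes an explicit parameter);
-- sorted([solve(r,c,half), solve(r,c+half,half), solve(r+half,c,half), solve(r+half,c+half,half)])[2]
def pvSolve (arr : List (List Int)) (r c size : Int) : Int :=
  if size = 1 then pvAt arr r c
  else if size < 1 then 0  -- totality guard: for size < 1 the Python recurses forever (outside Pre_)
  else
    let half := PySem.Int.floordiv size 2
    (PySem.List.pyGet?
      (PySem.List.sorted
        [pvSolve arr r c half, pvSolve arr r (c + half) half,
         pvSolve arr (r + half) c half, pvSolve arr (r + half) (c + half) half]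
        (fun x => x) false) 2).getD 0
termination_by size.toNat
decreasing_by
  all_goals rw [PySem.Int.floordiv_eq_ediv_of_pos (by omega)]
  all_goals omega

def Pulling_alt (n : Int) (arr : List (List Int)) : Int := pvSolve arr 0 0 n

-- ===== PRECONDITION & SPEC =====
-- Pre_: the side length n is a power of two (stated decidably as n = 2^log2(n)) and arr holds
-- at least an n×n grid — elsewhere the Python A hits an IndexError or recurses forever.
def Pre_Pulling (n : Int) (arr : List (List Int)) : Prop :=
  1 ≤ n ∧ n = 2 ^ n.toNat.log2 ∧ n.toNat ≤ arr.length ∧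
    ∀ r ∈ arr.take n.toNat, n.toNat ≤ r.length
instance (n : Int) (arr : List (List Int)) : Decidable (Pre_Pulling n arr) := by
  unfold Pre_Pulling; infer_instance

def pvWitness_Pulling : Int × List (List Int) := (2, [[1, 2], [3, 4]])

def Spec_Pulling (n : Int) (arr : List (List Int)) (out : Int) : Prop := out = Pulling_alt n arr
instance (n : Int) (arr : List (List Int)) (out : Int) : Decidable (Spec_Pulling n arr out) := by
  unfold Spec_Pulling; infer_instance

-- ===== CLAIM (what is proved, stated in full; the proofs are below) =====
def Claim_equal_Pulling : Prop := ∀ (n : Int) (arr : List (List Int)),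
  Dom_Pulling n arr → Pre_Pulling n arr → Spec_Pulling n arr (Pulling n arr)

-- ===== LEMMAS AND PROOFS =====

theorem pv_modify_modify {α : Type} (l : List α) (k : Nat) (f g : α → α) :
    (l.modify k g).modify k f = l.modify k (fun x => f (g x)) := by
  induction l generalizing k with
  | nil => simp
  | cons a t ih => cases k <;> simp [List.modify_cons] <;> exact ih _

theorem pv_modify_id {α : Type} (l : List α) (k : Nat) : l.modify k (fun x => x) = l := by
  induction l generalizing k with
  | nil => simp
  | cons a t ih => cases k <;> simp [List.modify_cons] <;> exact ih _

theorem pv_modify_append {α : Type} (pre : List α) (x : α) (rest : List α) (f : α → α) :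
    (pre ++ x :: rest).modify pre.length f = pre ++ f x :: rest := by
  induction pre with
  | nil => simp
  | cons a t ih => simpa [List.modify_cons] using ih

-- the inner j-loop: appending elements one by one to row k is one modify with the whole row
theorem pv_inner (js : List Int) (k : Nat) (f : Int → Int) (mat : List (List Int)) :
    js.foldl (fun m j => m.modify k (fun row => row ++ [f j])) mat
      = mat.modify k (fun row => row ++ js.map f) := by
  induction js generalizing mat with
  | nil => simpa using (pv_modify_id mat k).symm
  | cons j js ih =>
    simp only [List.foldl_cons, List.map_cons, ih, pv_modify_modify]
    congr 1
    funext row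
    simp

-- the outer i-loop over distinct rows: filling replicate-empty rows one by one is a map
theorem pv_outer (m : Nat) (g : Nat → List Int) :
    ∀ (a : Nat) (pre : List (List Int)), pre.length = a →
    (List.range' a m).foldl (fun mat t => mat.modify t (fun row => row ++ g t))
        (pre ++ List.replicate m ([] : List Int))
      = pre ++ (List.range' a m).map g := by
  induction m with
  | zero => simp
  | succ m ih =>
    intro a pre hp
    rw [List.range'_succ]
    simp only [List.foldl_cons, List.map_cons, List.replicate_succ]
    have h1 : (pre ++ [] :: List.replicate m ([] : List Int)).modify a (fun row => row ++ g a)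
        = (pre ++ [g a]) ++ List.replicate m ([] : List Int) := by
      rw [← hp, pv_modify_append]; simp
    rw [h1, ih (a + 1) (pre ++ [g a]) (by simp [hp])]
    simp

theorem pv_fdiv_two (m : Int) : PySem.Int.floordiv (2 * m) 2 = m := by
  rw [PySem.Int.floordiv_eq_ediv_of_pos (by omega)]
  omega

theorem pv_pyRange_even (m : Nat) (hm : 1 ≤ m) :
    PySem.List.pyRange 0 (2 * (m : Int)) 2 = (List.range m).map (fun (k : Nat) => 2 * (k : Int)) := by
  rw [PySem.List.pyRange_of_pos _ _ (by omega)]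
  have hc : (if (0:Int) < 2 * m then ((2 * (m:Int) - 0 + 2 - 1) / 2).toNat else 0) = m := by
    rw [if_pos (by omega)]
    omega
  rw [hc]
  apply List.map_congr_left
  intro k _
  ring

-- A's fold-and-append construction over the even indices equals a map, for any inner list js
theorem pv_build_gen (m : Nat) (js : List Int) (f : Int → Int → Int) :
    ((List.range m).map (fun (k : Nat) => 2 * (k : Int))).foldl
      (fun mat i => js.foldl
        (fun mat j =>
          mat.modify (PySem.Int.floordiv i 2).toNat (fun row => row ++ [f i j])) mat)
      (List.replicate m [])
    = ((List.range m).map (fun (k : Nat) => 2 * (k : Int))).map (fun i => js.map (f i)) := by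
  rw [List.foldl_map, List.map_map]
  have hstep : ∀ (mat : List (List Int)) (k : Nat),
      js.foldl (fun mat j =>
          mat.modify (PySem.Int.floordiv (2 * (k : Int)) 2).toNat
            (fun row => row ++ [f (2 * (k : Int)) j])) mat
      = mat.modify k (fun row => row ++ js.map (f (2 * (k : Int)))) := by
    intro mat k
    rw [show (PySem.Int.floordiv (2 * (k : Int)) 2).toNat = k by rw [pv_fdiv_two]; simp]
    exact pv_inner _ _ _ _
  rw [PySem.List.foldl_congr_mem _ _ _ _ (fun mat k _ => hstep mat k)]
  rw [List.range_eq_range']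
  simpa using pv_outer m (fun k => js.map (f (2 * (k : Int)))) 0 [] rfl

-- the grid A's one reduction round produces: cell (k, l) is pvThird arr (2k) (2l)
def pvGrid (arr : List (List Int)) (m : Nat) : List (List Int) :=
  (List.range m).map (fun (k : Nat) => (List.range m).map (fun (l : Nat) => pvThird arr (2 * (k : Int)) (2 * (l : Int))))

theorem pvAt_grid (arr : List (List Int)) (m r c : Nat) (hr : r < m) (hc : c < m) :
    pvAt (pvGrid arr m) (r : Int) (c : Int) = pvThird arr (2 * (r : Int)) (2 * (c : Int)) := by
  unfold pvAt pvGrid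
  simp only [PySem.List.pyGet?_natCast]
  simp [List.getElem?_map, List.getElem?_range, hr, hc]

-- quadrant recursion on the reduced grid = quadrant recursion on the original, one level up
theorem pv_solve_grid (arr : List (List Int)) (m : Nat) :
    ∀ (e r c : Nat), r + 2 ^ e ≤ m → c + 2 ^ e ≤ m →
      pvSolve (pvGrid arr m) (r : Int) (c : Int) ((2 : Int) ^ e)
        = pvSolve arr (2 * (r : Int)) (2 * (c : Int)) ((2 : Int) ^ (e + 1)) := by
  intro e
  induction e with
  | zero =>
    intro r c hr hc
    rw [pvSolve]
    rw [if_pos (by norm_num)]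
    rw [pvAt_grid arr m r c (by omega) (by omega)]
    rw [pvSolve]
    rw [if_neg (by norm_num), if_neg (by norm_num)]
    have h1 : PySem.Int.floordiv ((2:Int) ^ (0 + 1)) 2 = 1 := by
      rw [show ((2:Int) ^ (0+1)) = 2 * 1 by norm_num, pv_fdiv_two]
    simp only [h1]
    rw [pvSolve, pvSolve, pvSolve, pvSolve]
    simp [pvThird]
  | succ e ih =>
    intro r c hr hc
    have hsplit : 2 ^ (e + 1) = 2 ^ e + 2 ^ e := by rw [pow_succ]; omega
    have h2e : (0:Nat) < 2 ^ e := pow_pos (by norm_num) e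
    have hgt : (1:Int) < (2:Int) ^ (e + 1) := by
      calc (1:Int) < 2 ^ 1 := by norm_num
        _ ≤ 2 ^ (e+1) := by apply pow_le_pow_right₀ <;> omega
    have hgt2 : (1:Int) < (2:Int) ^ (e + 2) := by
      calc (1:Int) < 2 ^ 1 := by norm_num
        _ ≤ 2 ^ (e+2) := by apply pow_le_pow_right₀ <;> omega
    have hfd : PySem.Int.floordiv ((2:Int) ^ (e + 1)) 2 = (2:Int) ^ e := by
      rw [show ((2:Int) ^ (e+1)) = 2 * 2 ^ e by ring, pv_fdiv_two]
    have hfd2 : PySem.Int.floordiv ((2:Int) ^ (e + 2)) 2 = (2:Int) ^ (e + 1) := by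
      rw [show ((2:Int) ^ (e+2)) = 2 * 2 ^ (e+1) by ring, pv_fdiv_two]
    have hcast : ∀ (x : Nat), ((x : Int) + (2:Int) ^ e) = ((x + 2 ^ e : Nat) : Int) := by
      intro x; push_cast; ring
    have ih1 := ih r c (by omega) (by omega)
    have ih2 := ih r (c + 2 ^ e) (by omega) (by omega)
    have ih3 := ih (r + 2 ^ e) c (by omega) (by omega)
    have ih4 := ih (r + 2 ^ e) (c + 2 ^ e) (by omega) (by omega)
    rw [pvSolve]
    rw [if_neg (ne_of_gt hgt), if_neg (not_lt.mpr hgt.le)]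
    simp only [hfd]
    rw [hcast r, hcast c, ih1, ih2, ih3, ih4]
    conv_rhs => rw [pvSolve]
    rw [if_neg (ne_of_gt hgt2), if_neg (not_lt.mpr hgt2.le)]
    have hfd' : PySem.Int.floordiv ((2:Int) ^ (e + 1 + 1)) 2 = (2:Int) ^ (e + 1) := hfd2
    simp only [hfd']
    have h2c : ∀ (x : Nat), 2 * (((x + 2 ^ e : Nat)) : Int) = 2 * (x : Int) + (2:Int) ^ (e + 1) := by
      intro x; push_cast; ring
    rw [h2c r, h2c c]

theorem pv_pow_eq (k : Nat) (arr : List (List Int)) :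
    Pulling ((2 : Int) ^ k) arr = Pulling_alt ((2 : Int) ^ k) arr := by
  induction k generalizing arr with
  | zero =>
    rw [Pulling, Pulling_alt, pvSolve]
    norm_num
  | succ k ih =>
    have hge : (2 : Int) ≤ 2 ^ (k + 1) := by
      calc (2:Int) = 2 ^ 1 := by norm_num
        _ ≤ 2 ^ (k+1) := by apply pow_le_pow_right₀ <;> omega
    have h2 : ((2 : Int) ^ (k + 1)) = 2 * ((2 ^ k : Nat) : Int) := by push_cast; ring
    have hfd : PySem.Int.floordiv ((2:Int) ^ (k+1)) 2 = (2:Int) ^ k := by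
      rw [h2, pv_fdiv_two]; push_cast; ring
    have hmat : (PySem.List.pyRange 0 ((2:Int) ^ (k+1)) 2).foldl
        (fun mat i => (PySem.List.pyRange 0 ((2:Int) ^ (k+1)) 2).foldl
          (fun mat j =>
            mat.modify (PySem.Int.floordiv i 2).toNat (fun row => row ++ [pvThird arr i j])) mat)
        (List.replicate (((2:Int) ^ k).toNat) [])
        = pvGrid arr (2 ^ k) := by
      rw [show ((2 : Int) ^ k).toNat = 2 ^ k by
        rw [show ((2 : Int) ^ k) = ((2 ^ k : Nat) : Int) by push_cast; ring, Int.toNat_natCast]]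
      rw [h2, pv_pyRange_even (2 ^ k) Nat.one_le_two_pow]
      rw [pv_build_gen (2 ^ k) _ (pvThird arr)]
      unfold pvGrid
      rw [List.map_map]
      apply List.map_congr_left
      intro a _
      simp [Function.comp, List.map_map]
    rw [Pulling]
    rw [if_neg (by omega), if_neg (by omega)]
    simp only [hfd]
    rw [hmat, ih]
    rw [Pulling_alt, Pulling_alt]
    have := pv_solve_grid arr (2 ^ k) k 0 0 (by omega) (by omega)
    simpa using this

-- ===== VERDICT (by name: the statement is the Claim_ definition above) =====
theorem Pulling_spec : Claim_equal_Pulling := by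
  intro n arr _ hpre
  obtain ⟨h1, hk, -⟩ := hpre
  unfold Spec_Pulling
  rw [hk]
  exact pv_pow_eq n.toNat.log2 arr
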